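-- pv_equiv track=rewrite | github.com/Asinski/computer-science | algorithms/dynamic/grasshopper-3.py | grasshopper
-- ===== SOURCE A (Python) =====
-- def grasshopper(n, price: list):
--     cost = [float("-inf"), price[1], price[1] + price[2]] + [0] * (n - 2)
--     for i in range(3, n + 1):
--         cost[i] = price[i] + min(cost[i - 1], cost[i - 2])
--
--     path = [n]
--     tmp = n
--     while tmp > 1:
--         if cost[tmp - 1] < cost[tmp - 2]:
--             prev = tmp - 1
--         else:
--             prev = tmp - 2
--         path.append(prev)
--         tmp = prev
--
--     return cost[n], path[::-1]
-- ===== SOURCE B (Python) =====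
-- def grasshopper(n, price: list):
--     # Forward DP that grows its tables by appending and carries the FULL best
--     # path to every index, so there is no backward reconstruction loop at all.
--     # The choice rule is the same strict comparison A applies while
--     # backtracking (prefer i-2 on ties; the -inf cost of index 0 makes the
--     # best path to index 2 start 0 -> 2).
--     cost = [float("-inf"), price[1]]
--     best = [[0], [1]]
--     for i in range(2, n + 1):
--         step = i - 1 if cost[i - 1] < cost[i - 2] else i - 2
--         cost.append(price[1] + price[2] if i == 2
--                     else price[i] + min(cost[i - 1], cost[i - 2]))
--         best.append(best[step] + [i])
--     return cost[n], best[n]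
-- ===== Notes on version B (the rewrite author's own statement) =====
-- stated objective: alternative
-- what changed: B is a single forward DP that grows an appended cost table together with the FULL best path to every index and returns best[n] directly, eliminating A's backward path-reconstruction loop; it trades that for O(path-length) list copies per step.
-- outside the precondition, e.g. on grasshopper(-1, [5, 6, 7]): A returns (13, [-1]), B returns (6, [1]); on grasshopper(-1, [1, 2, 3]): A returns (5, [-1]), B returns (2, [1])
import Mathlib
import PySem

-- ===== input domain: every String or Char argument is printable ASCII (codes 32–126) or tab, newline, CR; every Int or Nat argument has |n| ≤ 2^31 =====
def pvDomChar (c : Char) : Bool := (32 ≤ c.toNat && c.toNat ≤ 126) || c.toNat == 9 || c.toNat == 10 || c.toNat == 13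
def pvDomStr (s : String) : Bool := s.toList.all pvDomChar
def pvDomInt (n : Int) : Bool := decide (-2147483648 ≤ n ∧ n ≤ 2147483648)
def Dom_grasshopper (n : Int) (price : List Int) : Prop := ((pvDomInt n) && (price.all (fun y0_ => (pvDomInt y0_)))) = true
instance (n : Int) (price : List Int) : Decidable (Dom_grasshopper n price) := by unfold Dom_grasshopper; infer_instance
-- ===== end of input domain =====

-- B is a single forward DP that appends each cost and the full best path to every index,
-- with no backward reconstruction loop (objective: alternative; not faster).


-- ===== PORT A =====
-- Python's cost list holds float('-inf') at index 0 and ints elsewhere; we model an entry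
-- as Option Int with none = -inf.  ltO/minO/addO are exactly Python's <, min, + on such
-- values (only -inf ever occurs as a non-int, so this is exact).
def ltO : Option Int → Option Int → Bool
  | none, some _ => true
  | some a, some b => decide (a < b)
  | _, none => false

def minO : Option Int → Option Int → Option Int
  | none, _ => none
  | some _, none => none
  | some a, some b => some (min a b)

def addO (p : Int) (o : Option Int) : Option Int := o.map (fun v => p + v)

-- one iteration of A's forward loop: cost[i] = price[i] + min(cost[i-1], cost[i-2])
def stepA (price : List Int) (c : List (Option Int)) (i : Int) : List (Option Int) :=
  PySem.List.pySetD c i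
    (addO (PySem.List.pyGetD price i 0)
      (minO (PySem.List.pyGetD c (i - 1) none) (PySem.List.pyGetD c (i - 2) none)))

-- A's backward while loop (tmp only takes nonnegative values reached from n ≥ 0)
def backA (cost : List (Option Int)) (tmp : Nat) (path : List Int) : List Int :=
  if _h : 1 < tmp then
    if ltO (PySem.List.pyGetD cost ((tmp : Int) - 1) none)
           (PySem.List.pyGetD cost ((tmp : Int) - 2) none)
    then backA cost (tmp - 1) (path ++ [((tmp - 1 : Nat) : Int)])
    else backA cost (tmp - 2) (path ++ [((tmp - 2 : Nat) : Int)])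
  else path
termination_by tmp

def grasshopper (n : Int) (price : List Int) : Int × List Int :=
  let p1 := PySem.List.pyGetD price 1 0
  let p2 := PySem.List.pyGetD price 2 0
  let cost0 : List (Option Int) :=
    [none, some p1, some (p1 + p2)] ++ List.replicate (n - 2).toNat (some 0)
  let cost := (PySem.List.pyRange 3 (n + 1) 1).foldl (stepA price) cost0
  let path := backA cost n.toNat [n]
  ((PySem.List.pyGetD cost n none).getD 0, path.reverse)

-- ===== PORT B =====
-- Source B grows two tables by appending: the cost of each index and the FULL best
-- path to it; one loop body (step choice, cost append, path append):
def stepB (price : List Int) (s : List (Option Int) × List (List Int)) (i : Int) :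
    List (Option Int) × List (List Int) :=
  let step := if ltO (PySem.List.pyGetD s.1 (i - 1) none) (PySem.List.pyGetD s.1 (i - 2) none)
              then i - 1 else i - 2
  let c := if i == 2 then some (PySem.List.pyGetD price 1 0 + PySem.List.pyGetD price 2 0)
           else addO (PySem.List.pyGetD price i 0)
             (minO (PySem.List.pyGetD s.1 (i - 1) none) (PySem.List.pyGetD s.1 (i - 2) none))
  (s.1 ++ [c], s.2 ++ [PySem.List.pyGetD s.2 step [] ++ [i]])

def grasshopper_alt (n : Int) (price : List Int) : Int × List Int :=
  let s := (PySem.List.pyRange 2 (n + 1) 1).foldl (stepB price)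
    ([none, some (PySem.List.pyGetD price 1 0)], [[0], [1]])
  ((PySem.List.pyGetD s.1 n none).getD 0, PySem.List.pyGetD s.2 n [])

-- ===== PRECONDITION & SPEC =====
-- Pre_ restricts to the natural domain n ≥ 1 with price long enough: for n ≤ 0 A returns
-- float('-inf') (not an int) or a negative-index wraparound value outside the intended
-- step-count domain, and for a too-short price list A raises IndexError.
def Pre_grasshopper (n : Int) (price : List Int) : Prop :=
  1 ≤ n ∧ 3 ≤ (price.length : Int) ∧ n + 1 ≤ (price.length : Int)
instance (n : Int) (price : List Int) : Decidable (Pre_grasshopper n price) := by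
  unfold Pre_grasshopper; infer_instance

def pvWitness_grasshopper : Int × List Int := (3, [0, 4, 1, 2])

def Spec_grasshopper (n : Int) (price : List Int) (out : Int × List Int) : Prop :=
  out = grasshopper_alt n price
instance (n : Int) (price : List Int) (out : Int × List Int) :
    Decidable (Spec_grasshopper n price out) := by unfold Spec_grasshopper; infer_instance

-- ===== CLAIM (what is proved, stated in full; the proofs are below) =====
def Claim_equal_grasshopper : Prop :=
  ∀ (n : Int) (price : List Int), Dom_grasshopper n price → Pre_grasshopper n price →
    Spec_grasshopper n price (grasshopper n price)

-- ===== LEMMAS AND PROOFS =====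

-- A's fold over range a.. leaves entries below a untouched
theorem stepA_fold_stable (price : List Int) (m : Nat) :
    ∀ (a b : Int) (c : List (Option Int)) (j : Nat), m = (b - a).toNat → (j : Int) < a →
      getElem? ((PySem.List.pyRange a b 1).foldl (stepA price) c) j = getElem? c j := by
  induction m with
  | zero =>
    intro a b c j hm hj
    rw [PySem.List.pyRange_one_eq_nil (by omega)]; rfl
  | succ m ih =>
    intro a b c j hm hj
    rw [PySem.List.pyRange_one_cons (by omega)]
    simp only [List.foldl_cons]
    rw [ih (a + 1) b _ j (by omega) (by omega)]
    simp only [stepA]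
    rw [PySem.List.pySetD_of_nonneg _ _ (by omega)]
    rw [List.getElem?_set_ne (by omega)]

theorem stepA_fold_length (price : List Int) (l : List Int) (c : List (Option Int)) :
    (l.foldl (stepA price) c).length = c.length := by
  induction l generalizing c with
  | nil => rfl
  | cons i l ih =>
    simp only [List.foldl_cons, ih, stepA, PySem.List.length_pySetD]

-- two lists that agree at an in-range index give the same pyGetD there
theorem pyGetD_congr_entry {alpha : Type} (X Y : List alpha) (d : alpha) (j : Int) (hj : 0 ≤ j)
    (hlen : X.length = Y.length) (hjY : j < (Y.length : Int))
    (h : getElem? X j.toNat = getElem? Y j.toNat) :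
    PySem.List.pyGetD X j d = PySem.List.pyGetD Y j d := by
  rw [PySem.List.pyGetD_eq_getElem _ _ hj (by omega),
      PySem.List.pyGetD_eq_getElem _ _ hj (by omega)]
  rw [List.getElem?_eq_getElem (by omega), List.getElem?_eq_getElem (by omega)] at h
  exact Option.some.inj h

-- cost entries below a are final before the fold over range a.. runs
theorem costFinal_entry (price : List Int) (m : Nat) (a b : Int) (c : List (Option Int))
    (j : Int) (hm : m = (b - a).toNat) (h0 : 0 ≤ j) (hja : j < a) (hjc : j < (c.length : Int)) :
    PySem.List.pyGetD ((PySem.List.pyRange a b 1).foldl (stepA price) c) j none =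
      PySem.List.pyGetD c j none := by
  refine pyGetD_congr_entry _ _ _ j h0 (stepA_fold_length ..) hjc ?_
  exact stepA_fold_stable price m a b c j.toNat hm (by omega)

-- each written entry of A's final cost array satisfies the DP recurrence
theorem cost_rec (price : List Int) (m : Nat) :
    ∀ (a b : Int) (c : List (Option Int)), m = (b - a).toNat → 2 ≤ a → b ≤ (c.length : Int) →
      ∀ k : Int, a ≤ k → k < b →
      PySem.List.pyGetD ((PySem.List.pyRange a b 1).foldl (stepA price) c) k none =
        addO (PySem.List.pyGetD price k 0)
          (minO (PySem.List.pyGetD ((PySem.List.pyRange a b 1).foldl (stepA price) c) (k - 1) none)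
                (PySem.List.pyGetD ((PySem.List.pyRange a b 1).foldl (stepA price) c) (k - 2) none)) := by
  induction m with
  | zero => intro a b c hm _ _ k hak hkb; omega
  | succ m ih =>
    intro a b c hm ha hc k hak hkb
    rw [PySem.List.pyRange_one_cons (by omega)]
    simp only [List.foldl_cons]
    have hlenA : (stepA price c a).length = c.length := by
      simp [stepA, PySem.List.length_pySetD]
    rcases eq_or_lt_of_le hak with hk | hk
    · -- k = a: entry a is written now and stable afterwards; a-1, a-2 are already final
      subst hk
      have ea : PySem.List.pyGetD ((PySem.List.pyRange (a + 1) b 1).foldl (stepA price)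
          (stepA price c a)) a none = PySem.List.pyGetD (stepA price c a) a none :=
        costFinal_entry price m (a + 1) b _ a (by omega) (by omega) (by omega)
          (by rw [hlenA]; omega)
      have eset : PySem.List.pyGetD (stepA price c a) a none =
          addO (PySem.List.pyGetD price a 0)
            (minO (PySem.List.pyGetD c (a - 1) none) (PySem.List.pyGetD c (a - 2) none)) := by
        simp only [stepA]
        rw [PySem.List.pySetD_of_nonneg _ _ (by omega)]
        rw [PySem.List.pyGetD_eq_getElem _ _ (by omega)
          (by rw [List.length_set]; omega)]
        rw [List.getElem_set_self]
      have e1 : PySem.List.pyGetD ((PySem.List.pyRange (a + 1) b 1).foldl (stepA price)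
          (stepA price c a)) (a - 1) none = PySem.List.pyGetD c (a - 1) none := by
        refine (costFinal_entry price m (a + 1) b _ (a - 1) (by omega) (by omega) (by omega)
          (by rw [hlenA]; omega)).trans ?_
        refine pyGetD_congr_entry _ _ _ (a - 1) (by omega) hlenA (by omega) ?_
        simp only [stepA]
        rw [PySem.List.pySetD_of_nonneg _ _ (by omega), List.getElem?_set_ne (by omega)]
      have e2 : PySem.List.pyGetD ((PySem.List.pyRange (a + 1) b 1).foldl (stepA price)
          (stepA price c a)) (a - 2) none = PySem.List.pyGetD c (a - 2) none := by
        refine (costFinal_entry price m (a + 1) b _ (a - 2) (by omega) (by omega) (by omega)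
          (by rw [hlenA]; omega)).trans ?_
        refine pyGetD_congr_entry _ _ _ (a - 2) (by omega) hlenA (by omega) ?_
        simp only [stepA]
        rw [PySem.List.pySetD_of_nonneg _ _ (by omega), List.getElem?_set_ne (by omega)]
      rw [ea, eset, e1, e2]
    · exact ih (a + 1) b (stepA price c a) (by omega) (by omega) (by rw [hlenA]; omega)
        k (by omega) hkb

-- A's backward loop only appends to its accumulator
theorem backA_acc (C : List (Option Int)) (t : Nat) :
    ∀ (path : List Int), backA C t path = path ++ backA C t [] := by
  induction t using Nat.strong_induction_on with
  | _ t ih =>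
    intro path
    by_cases ht : 1 < t
    · conv_lhs => rw [backA]
      conv_rhs => rw [backA]
      rw [dif_pos ht, dif_pos ht]
      split
      · rw [ih (t - 1) (by omega) (path ++ [((t - 1 : Nat) : Int)]),
            ih (t - 1) (by omega) ([] ++ [((t - 1 : Nat) : Int)])]
        simp
      · rw [ih (t - 2) (by omega) (path ++ [((t - 2 : Nat) : Int)]),
            ih (t - 2) (by omega) ([] ++ [((t - 2 : Nat) : Int)])]
        simp
    · conv_lhs => rw [backA]
      conv_rhs => rw [backA]
      rw [dif_neg ht, dif_neg ht]
      simp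

-- the forward-order path A's backward loop produces when started at t
def Rpath (C : List (Option Int)) (t : Nat) : List Int :=
  (backA C t []).reverse ++ [(t : Int)]

theorem Rpath_step (C : List (Option Int)) (t : Nat) (ht : 1 < t) :
    Rpath C t =
      Rpath C (if ltO (PySem.List.pyGetD C ((t : Int) - 1) none)
                      (PySem.List.pyGetD C ((t : Int) - 2) none)
               then t - 1 else t - 2) ++ [(t : Int)] := by
  unfold Rpath
  conv_lhs => rw [backA]
  rw [dif_pos ht]
  split
  · rw [backA_acc C (t - 1) ([] ++ [((t - 1 : Nat) : Int)])]
    simp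
  · rw [backA_acc C (t - 2) ([] ++ [((t - 2 : Nat) : Int)])]
    simp

-- pyGetD on an appended list: below the old length, and at the appended slot
theorem pyGetD_append_lt {alpha : Type} (xs ys : List alpha) (d : alpha) (j : Int)
    (h0 : 0 ≤ j) (h : j < (xs.length : Int)) :
    PySem.List.pyGetD (xs ++ ys) j d = PySem.List.pyGetD xs j d := by
  rw [PySem.List.pyGetD_eq_getElem _ _ h0 (by simp; omega),
      PySem.List.pyGetD_eq_getElem _ _ h0 (by omega)]
  exact List.getElem_append_left (by omega)

theorem pyGetD_append_self {alpha : Type} (xs : List alpha) (y : alpha) (d : alpha) :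
    PySem.List.pyGetD (xs ++ [y]) (xs.length : Int) d = y := by
  rw [PySem.List.pyGetD_eq_getElem _ _ (by omega) (by simp)]
  simp

-- B's appending fold reproduces A's final cost entries and backtracked paths
theorem B_inv (price : List Int) (C : List (Option Int)) (m : Nat) :
    ∀ (a n : Int) (cs : List (Option Int)) (bs : List (List Int)),
      m = (n + 1 - a).toNat → 2 ≤ a → a ≤ n + 1 →
      (cs.length : Int) = a → (bs.length : Int) = a →
      (∀ j : Int, 0 ≤ j → j < a →
        PySem.List.pyGetD cs j none = PySem.List.pyGetD C j none) →
      (∀ j : Int, 0 ≤ j → j < a → PySem.List.pyGetD bs j [] = Rpath C j.toNat) →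
      (∀ k : Int, a ≤ k → k ≤ n →
        PySem.List.pyGetD C k none =
          (if k == 2 then some (PySem.List.pyGetD price 1 0 + PySem.List.pyGetD price 2 0)
           else addO (PySem.List.pyGetD price k 0)
             (minO (PySem.List.pyGetD C (k - 1) none)
                   (PySem.List.pyGetD C (k - 2) none)))) →
      ∀ j : Int, 0 ≤ j → j ≤ n →
        PySem.List.pyGetD ((PySem.List.pyRange a (n + 1) 1).foldl (stepB price) (cs, bs)).1 j none
          = PySem.List.pyGetD C j none ∧
        PySem.List.pyGetD ((PySem.List.pyRange a (n + 1) 1).foldl (stepB price) (cs, bs)).2 j []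
          = Rpath C j.toNat := by
  induction m with
  | zero =>
    intro a n cs bs hm ha han hcl hbl hcs hbs _ j h0 hjn
    rw [PySem.List.pyRange_one_eq_nil (by omega)]
    exact ⟨hcs j h0 (by omega), hbs j h0 (by omega)⟩
  | succ m ih =>
    intro a n cs bs hm ha han hcl hbl hcs hbs hchar j h0 hjn
    rw [PySem.List.pyRange_one_cons (by omega)]
    simp only [List.foldl_cons]
    have hA1 : PySem.List.pyGetD cs (a - 1) none = PySem.List.pyGetD C (a - 1) none :=
      hcs (a - 1) (by omega) (by omega)
    have hA2 : PySem.List.pyGetD cs (a - 2) none = PySem.List.pyGetD C (a - 2) none :=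
      hcs (a - 2) (by omega) (by omega)
    have hca : (if a == 2 then
          some (PySem.List.pyGetD price 1 0 + PySem.List.pyGetD price 2 0)
        else addO (PySem.List.pyGetD price a 0)
          (minO (PySem.List.pyGetD cs (a - 1) none) (PySem.List.pyGetD cs (a - 2) none))) =
        PySem.List.pyGetD C a none := by
      rw [hA1, hA2]
      exact (hchar a le_rfl (by omega)).symm
    have hstepv : (if ltO (PySem.List.pyGetD cs (a - 1) none)
          (PySem.List.pyGetD cs (a - 2) none) then a - 1 else a - 2) =
        (if ltO (PySem.List.pyGetD C (a - 1) none)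
          (PySem.List.pyGetD C (a - 2) none) then a - 1 else a - 2) := by
      rw [hA1, hA2]
    have hba : PySem.List.pyGetD bs
          (if ltO (PySem.List.pyGetD cs (a - 1) none)
            (PySem.List.pyGetD cs (a - 2) none) then a - 1 else a - 2) [] ++ [a] =
        Rpath C a.toNat := by
      rw [hstepv, Rpath_step C a.toNat (by omega)]
      have c1 : ((a.toNat : Int) - 1) = a - 1 := by omega
      have c2 : ((a.toNat : Int) - 2) = a - 2 := by omega
      have c3 : ((a.toNat : Nat) : Int) = a := by omega
      rw [c1, c2, c3]
      split
      · rw [hbs (a - 1) (by omega) (by omega)]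
        congr 2
        omega
      · rw [hbs (a - 2) (by omega) (by omega)]
        congr 2
        omega
    have hstep : stepB price (cs, bs) a =
        (cs ++ [PySem.List.pyGetD C a none], bs ++ [Rpath C a.toNat]) := by
      simp only [stepB]
      rw [hca, hba]
    rw [hstep]
    refine ih (a + 1) n (cs ++ [PySem.List.pyGetD C a none]) (bs ++ [Rpath C a.toNat])
      (by omega) (by omega) (by omega)
      (by simp [List.length_append]; omega) (by simp [List.length_append]; omega)
      ?_ ?_ (fun k hk1 hk2 => hchar k (by omega) hk2) j h0 hjn
    · intro j' h0' hj'
      rcases lt_or_ge j' a with hlt | hge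
      · rw [pyGetD_append_lt _ _ _ _ h0' (by omega)]
        exact hcs j' h0' hlt
      · have hj'a : j' = a := by omega
        subst hj'a
        rw [show j' = (cs.length : Int) by omega]
        exact pyGetD_append_self _ _ _
    · intro j' h0' hj'
      rcases lt_or_ge j' a with hlt | hge
      · rw [pyGetD_append_lt _ _ _ _ h0' (by omega)]
        exact hbs j' h0' hlt
      · have hj'a : j' = a := by omega
        subst hj'a
        rw [show j' = (bs.length : Int) by omega]
        exact pyGetD_append_self _ _ _

-- ===== VERDICT (by name: the statement is the Claim_ definition above) =====
theorem grasshopper_spec : Claim_equal_grasshopper := by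
  intro n price _ hpre
  obtain ⟨hn, hlen3, hlenn⟩ := hpre
  unfold Spec_grasshopper
  simp only [grasshopper, grasshopper_alt]
  set p1 := PySem.List.pyGetD price 1 0 with hp1
  set p2 := PySem.List.pyGetD price 2 0 with hp2
  set cost0 : List (Option Int) :=
    [none, some p1, some (p1 + p2)] ++ List.replicate (n - 2).toNat (some 0) with hc0
  have hc0len : (cost0.length : Int) = 3 + (n - 2).toNat := by
    simp [hc0, List.length_replicate]
    omega
  set C := (PySem.List.pyRange 3 (n + 1) 1).foldl (stepA price) cost0 with hCdef
  have hApath : (backA C n.toNat [n]).reverse = Rpath C n.toNat := by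
    rw [backA_acc C n.toNat [n]]
    unfold Rpath
    rw [show ((n.toNat : Nat) : Int) = n by omega]
    simp
  rw [hApath]
  have hstab : ∀ j : Int, 0 ≤ j → j < 3 →
      PySem.List.pyGetD C j none = PySem.List.pyGetD cost0 j none := by
    intro j h0 h3
    exact costFinal_entry price (n - 2).toNat 3 (n + 1) cost0 j (by omega) h0 h3 (by omega)
  have hC0 : PySem.List.pyGetD C 0 none = none := by
    rw [hstab 0 (by omega) (by omega), hc0,
        PySem.List.pyGetD_eq_getElem _ _ (by omega) (by simp only [List.length_append, List.length_cons, List.length_nil, List.length_replicate]; omega)]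
    rfl
  have hC1 : PySem.List.pyGetD C 1 none = some p1 := by
    rw [hstab 1 (by omega) (by omega), hc0,
        PySem.List.pyGetD_eq_getElem _ _ (by omega) (by simp only [List.length_append, List.length_cons, List.length_nil, List.length_replicate]; omega)]
    rfl
  have hC2 : PySem.List.pyGetD C 2 none = some (p1 + p2) := by
    rw [hstab 2 (by omega) (by omega), hc0,
        PySem.List.pyGetD_eq_getElem _ _ (by omega) (by simp only [List.length_append, List.length_cons, List.length_nil, List.length_replicate]; omega)]
    rfl
  have hR0 : Rpath C 0 = [(0 : Int)] := by
    unfold Rpath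
    conv_lhs => rw [backA]
    rw [dif_neg (by omega)]
    rfl
  have hR1 : Rpath C 1 = [(1 : Int)] := by
    unfold Rpath
    conv_lhs => rw [backA]
    rw [dif_neg (by omega)]
    rfl
  have hrec := cost_rec price (n - 2).toNat 3 (n + 1) cost0 (by omega) (by omega) (by omega)
  have hchar : ∀ k : Int, 2 ≤ k → k ≤ n →
      PySem.List.pyGetD C k none =
        (if k == 2 then some (p1 + p2)
         else addO (PySem.List.pyGetD price k 0)
           (minO (PySem.List.pyGetD C (k - 1) none) (PySem.List.pyGetD C (k - 2) none))) := by
    intro k hk2 hkn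
    by_cases hk : k = 2
    · subst hk
      norm_num [hC2]
    · rw [if_neg (by simpa using hk), hCdef]
      exact hrec k (by omega) (by omega)
  have hmain := B_inv price C (n - 1).toNat 2 n [none, some p1] [[0], [1]]
    (by omega) le_rfl (by omega) (by simp) (by simp)
    (by
      intro j h0 hj2
      interval_cases j
      · rw [hC0]; rfl
      · rw [hC1]; rfl)
    (by
      intro j h0 hj2
      interval_cases j
      · rw [show ((0 : Int).toNat) = 0 from rfl, hR0]; rfl
      · rw [show ((1 : Int).toNat) = 1 from rfl, hR1]; rfl)
    hchar n (by omega) le_rfl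
  rw [hmain.1, hmain.2]
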